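-- pv_equiv track=rewrite | github.com/JasterV/SARSCOV-HIERARCHY | src/python/utils/fasta_map.py | __build_relation
-- ===== SOURCE A (Python) =====
-- def __build_relation(pair, table):
--     relation = dict()
--     for elem in pair:
--         for key, value in table[elem].items():
--             if key not in pair:
--                 relation.setdefault(key, []).append(value)
--     relation = {key: min(relation[key]) for key in relation}
--     return relation
-- ===== SOURCE B (Python) =====
-- def __build_relation(pair, table):
--     # Single-pass streaming minimum: keep one scalar per key instead of
--     # collecting all values into lists and taking min in a second pass.
--     relation = {}
--     for elem in pair:
--         for key, value in table[elem].items():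
--             if key not in pair:
--                 cur = relation.get(key)
--                 if cur is None or value < cur:
--                     relation[key] = value
--     return relation
-- ===== Notes on version B (the rewrite author's own statement) =====
-- stated objective: simpler
-- what changed: Replaces the two-phase build-lists-then-min algorithm (dict of value lists plus a second min-comprehension pass) with a single streaming pass that keeps one running scalar minimum per key.
import Mathlib
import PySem

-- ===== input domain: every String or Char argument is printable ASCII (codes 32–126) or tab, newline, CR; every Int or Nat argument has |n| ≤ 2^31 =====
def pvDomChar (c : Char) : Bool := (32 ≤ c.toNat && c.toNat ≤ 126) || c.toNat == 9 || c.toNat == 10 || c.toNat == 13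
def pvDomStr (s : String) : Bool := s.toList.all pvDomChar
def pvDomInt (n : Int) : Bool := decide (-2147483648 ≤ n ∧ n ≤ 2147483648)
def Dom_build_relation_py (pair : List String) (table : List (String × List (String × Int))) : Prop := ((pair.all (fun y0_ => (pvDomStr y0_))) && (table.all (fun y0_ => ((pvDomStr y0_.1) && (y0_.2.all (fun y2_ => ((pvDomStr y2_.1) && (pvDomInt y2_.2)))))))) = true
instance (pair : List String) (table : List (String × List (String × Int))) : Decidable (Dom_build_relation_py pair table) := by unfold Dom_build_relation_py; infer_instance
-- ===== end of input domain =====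

-- B replaces A's two-phase algorithm (collect per-key value lists, then a second min-comprehension pass) with a single pass keeping one running scalar minimum per key; same return value.


-- ===== PORT A =====
-- min(vs) for a nonempty list vs (every list in A's `relation` is nonempty by construction, so the 0 default is never used)
def pymin (vs : List Int) : Int := (PySem.List.min? vs (fun x => x)).getD 0

def build_relation_py (pair : List String) (table : List (String × List (String × Int))) : List (String × Int) :=
  let t : PySem.Dict String (List (String × Int)) := PySem.Dict.mk table
  let rel : PySem.Dict String (List Int) :=
    pair.foldl (fun rel elem =>
      (t.getD elem []).foldl (fun rel kv =>
        if kv.1 ∈ pair then rel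
        else rel.modify kv.1 [] (fun vs => vs ++ [kv.2])) rel)  -- relation.setdefault(key, []).append(value)
      PySem.Dict.empty
  -- {key: min(relation[key]) for key in relation}
  rel.keys.map (fun k => (k, pymin (rel.getD k [])))

-- ===== PORT B =====
def build_relation_py_alt (pair : List String) (table : List (String × List (String × Int))) : List (String × Int) :=
  let t : PySem.Dict String (List (String × Int)) := PySem.Dict.mk table
  (pair.foldl (fun rel elem =>
      (t.getD elem []).foldl (fun rel kv =>
        if kv.1 ∈ pair then rel
        else
          match rel.get? kv.1 with                      -- cur = relation.get(key)
          | none => rel.insert kv.1 kv.2                -- cur is None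
          | some cur => if kv.2 < cur then rel.insert kv.1 kv.2 else rel) rel)
    PySem.Dict.empty).items

-- ===== PRECONDITION & SPEC =====
-- Pre_ excludes exactly the inputs where Python A raises KeyError (table[elem] with elem not a key of table); B raises there too.
def Pre_build_relation_py (pair : List String) (table : List (String × List (String × Int))) : Prop :=
  ∀ e ∈ pair, (PySem.Dict.mk table).contains e = true
instance (pair : List String) (table : List (String × List (String × Int))) : Decidable (Pre_build_relation_py pair table) := by unfold Pre_build_relation_py; infer_instance

def pvWitness_build_relation_py : List String × (List (String × List (String × Int))) :=
  (["a", "b"], [("a", [("c", 3), ("d", 5)]), ("b", [("c", 1), ("a", 9)])])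

def Spec_build_relation_py (pair : List String) (table : List (String × List (String × Int))) (out : List (String × Int)) : Prop := out = build_relation_py_alt pair table
instance (pair : List String) (table : List (String × List (String × Int))) (out : List (String × Int)) : Decidable (Spec_build_relation_py pair table out) := by unfold Spec_build_relation_py; infer_instance

-- ===== CLAIM (what is proved, stated in full; the proofs are below) =====
def Claim_equal_build_relation_py : Prop := ∀ (pair : List String) (table : List (String × List (String × Int))), Dom_build_relation_py pair table → Pre_build_relation_py pair table → Spec_build_relation_py pair table (build_relation_py pair table)

-- ===== LEMMAS AND PROOFS =====

-- abstraction: B's loop state is A's loop state with every value list collapsed to its minimum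
def pvAbs (d : PySem.Dict String (List Int)) : PySem.Dict String Int :=
  PySem.Dict.mk (d.items.map (fun p => (p.1, pymin p.2)))

-- invariant maintained by A's loop: keys are distinct, value lists are nonempty
def pvInv (d : PySem.Dict String (List Int)) : Prop :=
  (d.items.map Prod.fst).Nodup ∧ ∀ p ∈ d.items, p.2 ≠ []

-- the two per-item loop bodies (definitionally equal to the inline lambdas of the ports)
def pvStepA (pair : List String) (d : PySem.Dict String (List Int)) (kv : String × Int) : PySem.Dict String (List Int) :=
  if kv.1 ∈ pair then d else d.modify kv.1 [] (fun vs => vs ++ [kv.2])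

def pvStepB (pair : List String) (d : PySem.Dict String Int) (kv : String × Int) : PySem.Dict String Int :=
  if kv.1 ∈ pair then d
  else
    match d.get? kv.1 with
    | none => d.insert kv.1 kv.2
    | some cur => if kv.2 < cur then d.insert kv.1 kv.2 else d

theorem pymin_append (vs : List Int) (v : Int) (h : vs ≠ []) :
    pymin (vs ++ [v]) = if v < pymin vs then v else pymin vs := by
  have hs : (PySem.List.min? vs (fun x => x)).isSome := by
    cases h' : PySem.List.min? vs (fun x => x) with
    | none => exact absurd ((PySem.List.min?_eq_none_iff _ _).mp h') h
    | some m => rfl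
  obtain ⟨m, hm⟩ := Option.isSome_iff_exists.mp hs
  simp only [pymin, PySem.List.min?] at hm ⊢
  rw [List.foldl_append, hm]
  simp only [List.foldl_cons, List.foldl_nil]
  split <;> simp_all

theorem pvAbs_contains (d : PySem.Dict String (List Int)) (k : String) :
    (pvAbs d).contains k = d.contains k := by
  simp only [pvAbs, PySem.Dict.contains, List.any_map]
  rfl

theorem pvAbs_get? (d : PySem.Dict String (List Int)) (k : String) :
    (pvAbs d).get? k = (d.get? k).map pymin := by
  simp only [pvAbs, PySem.Dict.get?, List.find?_map, Option.map_map]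
  rfl

theorem find?_unique {k : String} {l : List (String × List Int)}
    (hnd : (l.map Prod.fst).Nodup) {p₀ p : String × List Int}
    (hf : l.find? (fun q => q.1 == k) = some p₀) (hp : p ∈ l) (hk : (p.1 == k) = true) :
    p = p₀ := by
  induction l with
  | nil => simp at hp
  | cons q t ih =>
    simp only [List.map_cons, List.nodup_cons] at hnd
    rcases List.mem_cons.mp hp with rfl | hpt
    · simp only [List.find?_cons, hk] at hf
      exact (Option.some_inj.mp hf)
    · by_cases hq : (q.1 == k) = true
      · exfalso
        have hpk : p.1 = k := by simpa using hk
        have hqk : q.1 = k := by simpa using hq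
        exact hnd.1 (by simpa [hqk, hpk] using List.mem_map_of_mem (f := Prod.fst) hpt)
      · simp only [List.find?_cons, hq] at hf
        exact ih hnd.2 hf hpt

theorem pvStep_comm (pair : List String) (d : PySem.Dict String (List Int)) (kv : String × Int)
    (h : pvInv d) : pvAbs (pvStepA pair d kv) = pvStepB pair (pvAbs d) kv ∧ pvInv (pvStepA pair d kv) := by
  obtain ⟨k, v⟩ := kv
  by_cases hp : k ∈ pair
  · simp [pvStepA, pvStepB, hp, h]
  · simp only [pvStepA, pvStepB, if_neg hp]
    by_cases hc : d.contains k = true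
    · -- key already present
      have hsome : (d.items.find? (fun q => q.1 == k)).isSome := by
        obtain ⟨x, hx, hxk⟩ := List.any_eq_true.mp hc
        exact List.find?_isSome.mpr ⟨x, hx, hxk⟩
      obtain ⟨p₀, hfind⟩ := Option.isSome_iff_exists.mp hsome
      have hp₀mem : p₀ ∈ d.items := List.mem_of_find?_eq_some hfind
      have hvs : p₀.2 ≠ [] := h.2 _ hp₀mem
      have hp₀k : p₀.1 = k := by simpa using List.find?_some hfind
      have hget : d.get? k = some p₀.2 := by simp [PySem.Dict.get?, hfind]
      have hgetB : (pvAbs d).get? k = some (pymin p₀.2) := by simp [pvAbs_get?, hget]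
      have hgetD : d.getD k [] = p₀.2 := by simp [PySem.Dict.getD, hget]
      have hcB : (pvAbs d).contains k = true := by rw [pvAbs_contains]; exact hc
      have hmodify : d.modify k [] (fun vs => vs ++ [v]) =
          PySem.Dict.mk (d.items.map (fun p => if p.1 == k then (k, p₀.2 ++ [v]) else p)) := by
        simp [PySem.Dict.modify, PySem.Dict.insert, hc, hgetD]
      constructor
      · rw [hmodify, hgetB]
        show _ = if v < pymin p₀.2 then (pvAbs d).insert k v else pvAbs d
        by_cases hlt : v < pymin p₀.2
        · rw [if_pos hlt]
          simp only [PySem.Dict.insert, hcB, if_pos]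
          apply congrArg PySem.Dict.mk
          simp only [pvAbs, List.map_map]
          apply List.map_congr_left
          intro p _
          by_cases hpk : (p.1 == k) = true
          · simp [Function.comp, hpk, pymin_append _ _ hvs, hlt]
          · simp [Function.comp, hpk]
        · rw [if_neg hlt]
          apply congrArg PySem.Dict.mk
          simp only [List.map_map]
          apply List.map_congr_left
          intro p hpmem
          by_cases hpk : (p.1 == k) = true
          · have hpp₀ : p = p₀ := find?_unique h.1 hfind hpmem hpk
            subst hpp₀
            simp [Function.comp, pymin_append _ _ hvs, hlt, hp₀k]
          · simp [Function.comp, hpk]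
      · rw [hmodify]
        constructor
        · have : (d.items.map (fun p => if p.1 == k then (k, p₀.2 ++ [v]) else p)).map Prod.fst
              = d.items.map Prod.fst := by
            rw [List.map_map]
            apply List.map_congr_left
            intro p _
            by_cases hpk : (p.1 == k) = true
            · simp only [Function.comp, hpk, if_pos]
              exact (by simpa using hpk : p.1 = k).symm
            · simp [Function.comp, hpk]
          rw [this]; exact h.1
        · intro q hq
          obtain ⟨p, hpmem, hpe⟩ := List.mem_map.mp hq
          by_cases hpk : (p.1 == k) = true
          · rw [if_pos hpk] at hpe
            rw [← hpe]
            simp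
          · rw [if_neg hpk] at hpe
            exact hpe ▸ h.2 _ hpmem
    · -- new key
      have hcf : d.items.any (fun q => q.1 == k) = false := by
        exact Bool.eq_false_iff.mpr hc
      have hfind : d.items.find? (fun q => q.1 == k) = none := by
        rw [List.find?_eq_none]
        intro x hx
        simpa using List.any_eq_false.mp hcf x hx
      have hget : d.get? k = none := by simp [PySem.Dict.get?, hfind]
      have hgetB : (pvAbs d).get? k = none := by simp [pvAbs_get?, hget]
      have hcB : (pvAbs d).contains k = false := by rw [pvAbs_contains]; simpa using hc
      have hmodify : d.modify k [] (fun vs => vs ++ [v]) =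
          PySem.Dict.mk (d.items ++ [(k, [v])]) := by
        simp [PySem.Dict.modify, PySem.Dict.insert, hc, PySem.Dict.getD, hget]
      refine ⟨?_, ?_⟩
      · rw [hmodify, hgetB]
        simp only [PySem.Dict.insert, hcB, Bool.false_eq_true, if_false]
        apply congrArg PySem.Dict.mk
        simp [pvAbs]
        rfl
      · rw [hmodify]
        constructor
        · simp only [List.map_append, List.map_cons, List.map_nil]
          apply List.Nodup.append h.1 (List.nodup_singleton _)
          intro a ha hb
          simp only [List.mem_singleton] at hb
          subst hb
          apply hc
          obtain ⟨p, hpmem, hpe⟩ := List.mem_map.mp ha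
          exact List.any_eq_true.mpr ⟨p, hpmem, by simp [hpe]⟩
        · intro q hq
          rcases List.mem_append.mp hq with h1 | h2
          · exact h.2 _ h1
          · simp at h2; simp [h2]

theorem pvFold_comm (pair : List String) (l : List (String × Int)) (d : PySem.Dict String (List Int))
    (h : pvInv d) :
    pvAbs (l.foldl (pvStepA pair) d) = l.foldl (pvStepB pair) (pvAbs d) ∧ pvInv (l.foldl (pvStepA pair) d) := by
  induction l generalizing d with
  | nil => exact ⟨rfl, h⟩
  | cons kv t ih =>
    obtain ⟨h1, h2⟩ := pvStep_comm pair d kv h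
    simpa [List.foldl_cons, h1] using ih _ h2

theorem pvOuter_comm (pair : List String) (t : PySem.Dict String (List (String × Int)))
    (elems : List String) (d : PySem.Dict String (List Int)) (h : pvInv d) :
    pvAbs (elems.foldl (fun rel e => (t.getD e []).foldl (pvStepA pair) rel) d)
      = elems.foldl (fun rel e => (t.getD e []).foldl (pvStepB pair) rel) (pvAbs d)
    ∧ pvInv (elems.foldl (fun rel e => (t.getD e []).foldl (pvStepA pair) rel) d) := by
  induction elems generalizing d with
  | nil => exact ⟨rfl, h⟩
  | cons e es ih =>
    obtain ⟨h1, h2⟩ := pvFold_comm pair (t.getD e []) d h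
    simpa [List.foldl_cons, h1] using ih _ h2

theorem ports_eq (pair : List String) (table : List (String × List (String × Int))) :
    build_relation_py pair table = build_relation_py_alt pair table := by
  have hInv : pvInv (PySem.Dict.empty : PySem.Dict String (List Int)) :=
    ⟨List.nodup_nil, by intro p hp; simp [PySem.Dict.empty] at hp⟩
  obtain ⟨he, hi⟩ := pvOuter_comm pair (PySem.Dict.mk table) pair PySem.Dict.empty hInv
  show (pair.foldl (fun rel e => ((PySem.Dict.mk table).getD e []).foldl (pvStepA pair) rel) PySem.Dict.empty).keys.map
        (fun k => (k, pymin ((pair.foldl (fun rel e => ((PySem.Dict.mk table).getD e []).foldl (pvStepA pair) rel) PySem.Dict.empty).getD k [])))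
      = (pair.foldl (fun rel e => ((PySem.Dict.mk table).getD e []).foldl (pvStepB pair) rel) (pvAbs PySem.Dict.empty)).items
  rw [← he]
  set rel := pair.foldl (fun rel e => ((PySem.Dict.mk table).getD e []).foldl (pvStepA pair) rel) PySem.Dict.empty with hrel
  have : (pvAbs rel).items = rel.items.map (fun p => (p.1, pymin p.2)) := rfl
  rw [this, PySem.Dict.items_eq_map_keys rel hi.1 [], List.map_map]
  rfl

-- ===== VERDICT (by name: the statement is the Claim_ definition above) =====
theorem build_relation_py_spec : Claim_equal_build_relation_py := by
  intro pair table _ _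
  exact ports_eq pair table
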